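-- pv_equiv track=rewrite | github.com/paulecar/apa | apa_tools.py | mark_roster
-- ===== SOURCE A (Python) =====
-- def mark_roster(roster, options):
--     for player in roster:
--         roster[player]['Option'] = 'N'
--
--     for roster_player in roster:
--         for option in options:
--             for player in option:
--                 if roster_player == player:
--                     roster[roster_player]['Option'] = 'Y'
--                     break
--
--     return roster
-- ===== SOURCE B (Python) =====
-- def mark_roster(roster, options):
--     for player in roster:
--         roster[player]['Option'] = 'N'
--
--     for option in options:
--         for player in option:
--             if player in roster:
--                 roster[player]['Option'] = 'Y'
--
--     return roster
-- ===== Notes on version B (the rewrite author's own statement) =====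
-- stated objective: faster
-- what changed: Inverted the traversal: instead of re-scanning every option list for each roster player (nested scans), B makes one pass over the options and probes the roster dict itself for membership; Pre_ excludes association lists with duplicate roster keys, which cannot arise from a Python dict and on which first-occurrence update order is accidental.
import Mathlib
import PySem

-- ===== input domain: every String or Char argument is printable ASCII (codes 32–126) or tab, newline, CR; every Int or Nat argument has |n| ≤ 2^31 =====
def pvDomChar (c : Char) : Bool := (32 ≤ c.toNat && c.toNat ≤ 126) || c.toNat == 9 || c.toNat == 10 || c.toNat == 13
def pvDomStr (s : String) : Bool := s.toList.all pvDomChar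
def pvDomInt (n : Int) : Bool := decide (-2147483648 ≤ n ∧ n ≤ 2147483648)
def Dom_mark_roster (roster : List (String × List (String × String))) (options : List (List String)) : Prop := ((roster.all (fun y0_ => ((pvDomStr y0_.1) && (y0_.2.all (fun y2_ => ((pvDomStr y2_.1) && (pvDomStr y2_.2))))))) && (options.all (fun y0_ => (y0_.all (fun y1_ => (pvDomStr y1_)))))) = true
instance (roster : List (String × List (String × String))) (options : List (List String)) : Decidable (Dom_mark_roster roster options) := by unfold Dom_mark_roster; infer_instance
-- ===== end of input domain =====

-- B inverts A's traversal: one pass over options probing the roster dict, instead of re-scanning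
-- every option per roster player.  Both Pythons mutate `roster` in place and return it; the final
-- mutated state coincides with the return value, so the return-value equivalence proved here also
-- describes the side effect.

-- dict-primitive helpers shared by both ports (port of Python's `d[k] = v` / `d[k] = f(d[k])`
-- on the association-list rendering; exact for unique keys, which Pre_ guarantees for the roster
-- and which the overwrite-in-place recursion itself gives for the inner dicts):
-- `inner[k] = v`: overwrite the first entry with key k in place, else append.
def dinsert : List (String × String) → String → String → List (String × String)
  | [], k, v => [(k, v)]
  | p :: rest, k, v => if p.1 = k then (k, v) :: rest else p :: dinsert rest k v

-- `roster[k]` updated through f at the first entry with key k (no-op if k is absent).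
def modifyFirst : List (String × List (String × String)) → String →
    (List (String × String) → List (String × String)) → List (String × List (String × String))
  | [], _, _ => []
  | e :: rest, k, f => if e.1 = k then (e.1, f e.2) :: rest else e :: modifyFirst rest k f

-- ===== PORT A =====
-- innermost loop of A: `for player in option: if roster_player == player: set 'Y'; break`
def innerA (d : List (String × List (String × String))) (k : String) :
    List String → List (String × List (String × String))
  | [] => d
  | p :: rest =>
      if k = p then modifyFirst d k (fun inner => dinsert inner "Option" "Y")
      else innerA d k rest

def mark_roster (roster : List (String × List (String × String))) (options : List (List String)) :
    List (String × List (String × String)) :=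
  -- for player in roster: roster[player]['Option'] = 'N'
  let r1 := (roster.map Prod.fst).foldl
    (fun d player => modifyFirst d player (fun inner => dinsert inner "Option" "N")) roster
  -- for roster_player in roster: for option in options: inner loop with break
  (r1.map Prod.fst).foldl
    (fun d rp => options.foldl (fun d opt => innerA d rp opt) d) r1

-- ===== PORT B =====
def mark_roster_alt (roster : List (String × List (String × String))) (options : List (List String)) :
    List (String × List (String × String)) :=
  -- for player in roster: roster[player]['Option'] = 'N'
  let r1 := (roster.map Prod.fst).foldl
    (fun d player => modifyFirst d player (fun inner => dinsert inner "Option" "N")) roster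
  -- for option in options: for player in option: if player in roster: roster[player]['Option'] = 'Y'
  options.foldl
    (fun d option => option.foldl
      (fun d player =>
        if d.any (fun e => e.1 = player)
        then modifyFirst d player (fun inner => dinsert inner "Option" "Y")
        else d) d) r1

-- ===== PRECONDITION & SPEC =====
-- Pre_ excludes association lists with duplicate roster keys: a Python dict cannot contain them,
-- so any behaviour of the ports there is an artefact of the list rendering, not of A.
def Pre_mark_roster (roster : List (String × List (String × String))) (options : List (List String)) : Prop :=
  (roster.map Prod.fst).Nodup
instance (roster : List (String × List (String × String))) (options : List (List String)) : Decidable (Pre_mark_roster roster options) := by unfold Pre_mark_roster; infer_instance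

def pvWitness_mark_roster : (List (String × List (String × String))) × List (List String) :=
  ([("ann", [("skill", "3")]), ("bob", [])], [["cid", "bob"], ["ann"]])

def Spec_mark_roster (roster : List (String × List (String × String))) (options : List (List String)) (out : List (String × List (String × String))) : Prop := out = mark_roster_alt roster options
instance (roster : List (String × List (String × String))) (options : List (List String)) (out : List (String × List (String × String))) : Decidable (Spec_mark_roster roster options out) := by unfold Spec_mark_roster; infer_instance

-- ===== CLAIM (what is proved, stated in full; the proofs are below) =====
def Claim_equal_mark_roster : Prop := ∀ (roster : List (String × List (String × String))) (options : List (List String)), Dom_mark_roster roster options → Pre_mark_roster roster options → Spec_mark_roster roster options (mark_roster roster options)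

-- ===== LEMMAS AND PROOFS =====

-- apply f to the value of every entry whose key satisfies P (the pointwise normal form both
-- phase-2 folds are reduced to)
def mapIf (d : List (String × List (String × String))) (P : String → Bool)
    (f : List (String × String) → List (String × String)) : List (String × List (String × String)) :=
  d.map (fun e => if P e.1 then (e.1, f e.2) else e)

theorem fst_modifyFirst (d : List (String × List (String × String))) (k : String) (f : List (String × String) → List (String × String)) :
    (modifyFirst d k f).map Prod.fst = d.map Prod.fst := by
  induction d with
  | nil => rfl
  | cons e rest ih =>
      simp only [modifyFirst]
      split_ifs with h
      · simp [h]
      · simp [ih]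

theorem fst_mapIf (d : List (String × List (String × String))) (P : String → Bool) (f : List (String × String) → List (String × String)) :
    (mapIf d P f).map Prod.fst = d.map Prod.fst := by
  induction d with
  | nil => rfl
  | cons e rest ih =>
      simp only [mapIf, List.map_cons] at *
      split_ifs with h <;> simp [ih]

theorem mapIf_of_all_not (d : List (String × List (String × String))) (P : String → Bool) (f : List (String × String) → List (String × String))
    (h : ∀ e ∈ d, P e.1 = false) : mapIf d P f = d := by
  induction d with
  | nil => rfl
  | cons e rest ih =>
      simp only [mapIf, List.map_cons]
      rw [h e (by simp)]
      simp only [if_neg Bool.false_ne_true]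
      exact congrArg _ (ih (fun e he => h e (by simp [he])))

theorem mapIf_false (d : List (String × List (String × String))) (f : List (String × String) → List (String × String)) :
    mapIf d (fun _ => false) f = d :=
  mapIf_of_all_not d _ f (fun _ _ => rfl)

theorem modifyFirst_eq_mapIf (d : List (String × List (String × String))) (k : String) (f : List (String × String) → List (String × String))
    (hnd : (d.map Prod.fst).Nodup) : modifyFirst d k f = mapIf d (fun k' => k' == k) f := by
  induction d with
  | nil => rfl
  | cons e rest ih =>
      simp only [List.map_cons, List.nodup_cons] at hnd
      by_cases h : e.1 = k
      · have hb : (e.1 == k) = true := beq_iff_eq.mpr h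
        simp only [modifyFirst, if_pos h, mapIf, List.map_cons, hb]
        refine congrArg _ ?_
        refine Eq.trans ?_ ((mapIf_of_all_not rest (fun k' => k' == k) f ?_).symm)
        · rfl
        · intro e' he'
          have hm : e'.1 ∈ rest.map Prod.fst := List.mem_map_of_mem he'
          have hne : e'.1 ≠ e.1 := fun hh => hnd.1 (hh ▸ hm)
          simp [h ▸ hne]
      · have hb : (e.1 == k) = false := beq_eq_false_iff_ne.mpr h
        simp only [modifyFirst, if_neg h, mapIf, List.map_cons, hb, Bool.false_eq_true, if_false]
        exact congrArg _ (ih hnd.2)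

theorem mapIf_mapIf (d : List (String × List (String × String))) (P Q : String → Bool) (f : List (String × String) → List (String × String))
    (hf : ∀ v, f (f v) = f v) :
    mapIf (mapIf d P f) Q f = mapIf d (fun k => P k || Q k) f := by
  induction d with
  | nil => rfl
  | cons e rest ih =>
      simp only [mapIf, List.map_cons] at *
      by_cases hP : P e.1 = true
      · by_cases hQ : Q e.1 = true
        · simp [hP, hQ, hf, ih]
        · simp [hP, hQ, ih]
      · by_cases hQ : Q e.1 = true
        · simp [hP, hQ, ih]
        · simp [hP, hQ, ih]

theorem foldl_mapIf {β : Type} (f : List (String × String) → List (String × String))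
    (hf : ∀ v, f (f v) = f v) (l : List β) (C : β → String → Bool) :
    ∀ d, l.foldl (fun d x => mapIf d (C x) f) d = mapIf d (fun k => l.any (fun x => C x k)) f := by
  induction l with
  | nil => intro d; simp [mapIf_false]
  | cons x rest ih =>
      intro d
      simp only [List.foldl_cons, ih, mapIf_mapIf _ _ _ _ hf, List.any_cons]

theorem foldl_congr_inv {α β : Type} (Inv : α → Prop) (g₁ g₂ : α → β → α)
    (hpres : ∀ a b, Inv a → Inv (g₂ a b)) (heq : ∀ a b, Inv a → g₁ a b = g₂ a b) :
    ∀ (l : List β) (a : α), Inv a → l.foldl g₁ a = l.foldl g₂ a := by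
  intro l
  induction l with
  | nil => intro a _; rfl
  | cons x rest ih =>
      intro a ha
      simp only [List.foldl_cons, heq a x ha]
      exact ih _ (hpres a x ha)

theorem mapIf_congr (d : List (String × List (String × String))) (P Q : String → Bool) (f : List (String × String) → List (String × String))
    (h : ∀ e ∈ d, P e.1 = Q e.1) : mapIf d P f = mapIf d Q f := by
  unfold mapIf
  exact List.map_congr_left (fun e he => by rw [h e he])

theorem dinsert_idem (inner : List (String × String)) (k v : String) :
    dinsert (dinsert inner k v) k v = dinsert inner k v := by
  induction inner with
  | nil => simp [dinsert]
  | cons p rest ih =>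
      simp only [dinsert]
      split_ifs with h
      · simp [dinsert]
      · simp only [dinsert, if_neg h, ih]

theorem innerA_eq (d : List (String × List (String × String))) (k : String) (opt : List String) :
    innerA d k opt = if opt.any (fun p => k == p)
      then modifyFirst d k (fun inner => dinsert inner "Option" "Y") else d := by
  induction opt with
  | nil => simp [innerA]
  | cons p rest ih =>
      simp only [innerA, List.any_cons]
      by_cases h : k = p
      · simp [h]
      · simp [h, ih]

-- a fold of guarded modifyFirst steps over distinct-key d, reduced to mapIf
theorem foldl_modifyIf {β : Type} (f : List (String × String) → List (String × String))
    (hf : ∀ v, f (f v) = f v) (c : β → Bool) (key : β → String) :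
    ∀ (l : List β) (d : List (String × List (String × String))), (d.map Prod.fst).Nodup →
      l.foldl (fun d x => if c x then modifyFirst d (key x) f else d) d
        = mapIf d (fun k => l.any (fun x => c x && (k == key x))) f := by
  intro l
  induction l with
  | nil => intro d _; simp [mapIf_false]
  | cons x rest ih =>
      intro d hnd
      have hstep : (if c x then modifyFirst d (key x) f else d)
          = mapIf d (fun k => c x && (k == key x)) f := by
        by_cases hc : c x = true
        · simp only [hc, Bool.true_and]
          exact modifyFirst_eq_mapIf d (key x) f hnd
        · simp only [if_neg hc, Bool.not_eq_true] at *
          simp only [hc, Bool.false_and]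
          exact (mapIf_false d f).symm
      simp only [List.foldl_cons, hstep]
      rw [ih _ (by rw [fst_mapIf]; exact hnd), mapIf_mapIf _ _ _ _ hf]
      refine mapIf_congr _ _ _ _ (fun e _ => ?_)
      simp [List.any_cons]

theorem mark_roster_eq_alt (roster : List (String × List (String × String))) (options : List (List String))
    (hpre : (roster.map Prod.fst).Nodup) :
    mark_roster roster options = mark_roster_alt roster options := by
  unfold mark_roster mark_roster_alt
  set fY : List (String × String) → List (String × String) := fun inner => dinsert inner "Option" "Y" with hfY
  have hfidem : ∀ v, fY (fY v) = fY v := fun v => dinsert_idem v "Option" "Y"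
  set r1 := (roster.map Prod.fst).foldl
    (fun d player => modifyFirst d player (fun inner => dinsert inner "Option" "N")) roster with hr1
  -- keys are preserved through phase 1, so r1 has distinct keys too
  have hkeys : ∀ (ks : List String) (d : List (String × List (String × String))),
      ((ks.foldl (fun d k => modifyFirst d k (fun inner => dinsert inner "Option" "N")) d).map Prod.fst)
        = d.map Prod.fst := by
    intro ks
    induction ks with
    | nil => intro d; rfl
    | cons k rest ih => intro d; simp only [List.foldl_cons, ih, fst_modifyFirst]
  have hnd1 : (r1.map Prod.fst).Nodup := by rw [hr1, hkeys]; exact hpre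
  -- A's phase 2 reduced to the pointwise normal form
  have hA : (r1.map Prod.fst).foldl (fun d rp => options.foldl (fun d opt => innerA d rp opt) d) r1
      = mapIf r1 (fun k => (r1.map Prod.fst).any
          (fun rp => options.any (fun opt => (opt.any (fun p => rp == p)) && (k == rp)))) fY := by
    have hstep : ∀ (d : List (String × List (String × String))) (rp : String), (d.map Prod.fst).Nodup →
        options.foldl (fun d opt => innerA d rp opt) d
          = mapIf d (fun k => options.any (fun opt => (opt.any (fun p => rp == p)) && (k == rp))) fY := by
      intro d rp hnd
      have h1 : options.foldl (fun d opt => innerA d rp opt) d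
          = options.foldl (fun d opt => if opt.any (fun p => rp == p) then modifyFirst d rp fY else d) d :=
        foldl_congr_inv (fun _ => True) _ _ (fun _ _ _ => trivial)
          (fun a b _ => innerA_eq a rp b) options d trivial
      rw [h1]
      exact foldl_modifyIf fY hfidem (fun opt => opt.any (fun p => rp == p)) (fun _ => rp) options d hnd
    rw [foldl_congr_inv (fun d => (d.map Prod.fst).Nodup) _
          (fun d rp => mapIf d (fun k => options.any (fun opt => (opt.any (fun p => rp == p)) && (k == rp))) fY)
          (fun a b ha => by dsimp only; rw [fst_mapIf]; exact ha)
          (fun a b ha => hstep a b ha) _ r1 hnd1]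
    exact foldl_mapIf fY hfidem (r1.map Prod.fst) _ r1
  -- B's phase 2 reduced to the pointwise normal form
  have hB : options.foldl (fun d option => option.foldl
        (fun d player => if d.any (fun e => e.1 = player) then modifyFirst d player fY else d) d) r1
      = mapIf r1 (fun k => options.any (fun opt => opt.any (fun p => k == p))) fY := by
    have hstepin : ∀ (d : List (String × List (String × String))) (p : String), (d.map Prod.fst).Nodup →
        (if d.any (fun e => e.1 = p) then modifyFirst d p fY else d) = mapIf d (fun k => k == p) fY := by
      intro d p hnd
      by_cases hc : d.any (fun e => e.1 = p) = true
      · rw [if_pos hc]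
        exact modifyFirst_eq_mapIf d p fY hnd
      · rw [if_neg hc]
        refine (mapIf_of_all_not d _ fY (fun e he => ?_)).symm
        simp only [List.any_eq_true, decide_eq_true_eq, not_exists, not_and] at hc
        simp only [beq_eq_false_iff_ne, ne_eq]
        exact fun hh => (hc e he) hh
    have hstep : ∀ (d : List (String × List (String × String))) (opt : List String), (d.map Prod.fst).Nodup →
        opt.foldl (fun d player => if d.any (fun e => e.1 = player) then modifyFirst d player fY else d) d
          = mapIf d (fun k => opt.any (fun p => k == p)) fY := by
      intro d opt hnd
      rw [foldl_congr_inv (fun d => (d.map Prod.fst).Nodup) _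
            (fun d p => mapIf d (fun k => k == p) fY)
            (fun a b ha => by dsimp only; rw [fst_mapIf]; exact ha)
            (fun a b ha => hstepin a b ha) opt d hnd]
      exact foldl_mapIf fY hfidem opt (fun p k => k == p) d
    rw [foldl_congr_inv (fun d => (d.map Prod.fst).Nodup) _
          (fun d opt => mapIf d (fun k => opt.any (fun p => k == p)) fY)
          (fun a b ha => by dsimp only; rw [fst_mapIf]; exact ha)
          (fun a b ha => hstep a b ha) options r1 hnd1]
    exact foldl_mapIf fY hfidem options (fun opt k => opt.any (fun p => k == p)) r1
  rw [hA, hB]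
  refine mapIf_congr _ _ _ _ (fun e he => ?_)
  have hmem : e.1 ∈ r1.map Prod.fst := List.mem_map_of_mem he
  apply Bool.eq_iff_iff.mpr
  simp only [List.any_eq_true, Bool.and_eq_true, beq_iff_eq]
  constructor
  · rintro ⟨rp, _, opt, hopt, ⟨p, hp, hrp⟩, hk⟩
    exact ⟨opt, hopt, p, hp, hk.trans hrp⟩
  · rintro ⟨opt, hopt, p, hp, hk⟩
    exact ⟨e.1, hmem, opt, hopt, ⟨p, hp, hk⟩, rfl⟩

-- ===== VERDICT (by name: the statement is the Claim_ definition above) =====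
theorem mark_roster_spec : Claim_equal_mark_roster := by
  intro roster options _ hpre
  unfold Spec_mark_roster
  exact mark_roster_eq_alt roster options hpre
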